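-- pv_equiv track=rewrite | github.com/GlassOnTin/nchorder | src/nchorder_tools/gui/exercise_view.py | _get_rows_for_chord
-- ===== SOURCE A (Python) =====
-- THUMB_BITS = {'T1': 0, 'T2': 4, 'T3': 8, 'T4': 12, 'T0': 19}
--
-- ROW_BITS = {
--     'F1': [1, 2, 3],      # F1L, F1M, F1R
--     'F2': [5, 6, 7],      # F2L, F2M, F2R
--     'F3': [9, 10, 11],    # F3L, F3M, F3R
--     'F4': [13, 14, 15],   # F4L, F4M, F4R
--     'F0': [16, 17, 18],   # F0L, F0M, F0R
-- }
--
-- def _get_rows_for_chord(mask: int) -> set: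
--     """Get which rows/thumbs are used in a chord."""
--     rows = set()
--     for row_name, bits in ROW_BITS.items():
--         if any(mask & (1 << bit) for bit in bits):
--             rows.add(row_name)
--     for thumb_name, bit in THUMB_BITS.items():
--         if mask & (1 << bit):
--             rows.add(thumb_name)
--     return rows
-- ===== SOURCE B (Python) =====
-- # Each row/thumb occupies one contiguous bit field of the mask: the three keys of
-- # row Fi are bits s..s+2 and each thumb is the single bit s.  Extract the field
-- # arithmetically with one shift and one modulus -- no bitwise AND, no per-bit scan.
-- ROW_FIELDS = {
--     'F1': (1, 8), 'F2': (5, 8), 'F3': (9, 8), 'F4': (13, 8), 'F0': (16, 8),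
--     'T1': (0, 2), 'T2': (4, 2), 'T3': (8, 2), 'T4': (12, 2), 'T0': (19, 2),
-- }
--
-- def _get_rows_for_chord(mask: int) -> set:
--     """Get which rows/thumbs are used in a chord."""
--     return {name for name, (shift, width) in ROW_FIELDS.items()
--             if (mask >> shift) % width}
-- ===== Notes on version B (the rewrite author's own statement) =====
-- stated objective: alternative
-- what changed: Replaces per-bit masking (mask AND a single-bit mask per bit, with an inner any-scan over each row's three bits) by one arithmetic shift-and-modulus test per contiguous bit field: each F-row is extracted as a three-bit field and each thumb as a one-bit field, so no bitwise AND and no per-bit iteration remain.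
import Mathlib
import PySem

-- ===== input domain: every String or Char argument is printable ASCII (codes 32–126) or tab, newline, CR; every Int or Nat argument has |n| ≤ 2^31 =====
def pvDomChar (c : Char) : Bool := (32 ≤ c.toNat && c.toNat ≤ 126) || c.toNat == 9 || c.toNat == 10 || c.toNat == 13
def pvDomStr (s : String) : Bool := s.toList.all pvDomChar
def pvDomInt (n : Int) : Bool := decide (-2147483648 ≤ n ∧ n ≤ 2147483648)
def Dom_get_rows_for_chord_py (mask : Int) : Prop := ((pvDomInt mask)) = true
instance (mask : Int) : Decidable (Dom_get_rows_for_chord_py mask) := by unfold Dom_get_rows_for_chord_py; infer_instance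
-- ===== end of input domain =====

-- B tests each contiguous bit field (three bits per F-row, one per thumb) with a single
-- shift-and-modulus instead of A's per-bit masking with an inner any-scan (objective: alternative).


-- ===== PORT A =====
def THUMB_BITS : PySem.Dict String Nat :=
  PySem.Dict.ofList [("T1", 0), ("T2", 4), ("T3", 8), ("T4", 12), ("T0", 19)]

def ROW_BITS : PySem.Dict String (List Nat) :=
  PySem.Dict.ofList
    [("F1", [1, 2, 3]), ("F2", [5, 6, 7]), ("F3", [9, 10, 11]),
     ("F4", [13, 14, 15]), ("F0", [16, 17, 18])]

def get_rows_for_chord_py (mask : Int) : List String :=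
  let rows : PySem.Set String := PySem.Set.empty
  let rows := (PySem.Dict.items ROW_BITS).foldl
    (fun rows rb =>
      if rb.2.any (fun bit => PySem.Int.band mask ((1 : Int) <<< bit) != 0) then
        PySem.Set.add rows rb.1
      else rows) rows
  (PySem.Dict.items THUMB_BITS).foldl
    (fun rows tb =>
      if PySem.Int.band mask ((1 : Int) <<< tb.2) != 0 then
        PySem.Set.add rows tb.1
      else rows) rows

-- ===== PORT B =====
def ROW_FIELDS : PySem.Dict String (Nat × Int) :=
  PySem.Dict.ofList
    [("F1", (1, 8)), ("F2", (5, 8)), ("F3", (9, 8)), ("F4", (13, 8)), ("F0", (16, 8)),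
     ("T1", (0, 2)), ("T2", (4, 2)), ("T3", (8, 2)), ("T4", (12, 2)), ("T0", (19, 2))]

def get_rows_for_chord_py_alt (mask : Int) : List String :=
  (PySem.Dict.items ROW_FIELDS).foldl
    (fun rows p =>
      if PySem.Int.mod (mask >>> p.2.1) p.2.2 != 0 then
        PySem.Set.add rows p.1
      else rows) PySem.Set.empty

-- ===== PRECONDITION & SPEC =====
def Spec_get_rows_for_chord_py (mask : Int) (out : List String) : Prop := out = get_rows_for_chord_py_alt mask
instance (mask : Int) (out : List String) : Decidable (Spec_get_rows_for_chord_py mask out) := by unfold Spec_get_rows_for_chord_py; infer_instance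

-- ===== CLAIM (what is proved, stated in full; the proofs are below) =====
def Claim_equal_get_rows_for_chord_py : Prop := ∀ (mask : Int), Dom_get_rows_for_chord_py mask → Spec_get_rows_for_chord_py mask (get_rows_for_chord_py mask)

-- ===== LEMMAS AND PROOFS =====

theorem pv_ediv_neg_succ (M d : Int) (_hM0 : 0 ≤ M) (hd : 0 < d) :
    (-(M+1))/d = -(M/d) - 1 := by
  have h := Int.emod_nonneg M (by omega : d ≠ 0)
  have h2 := Int.emod_lt_of_pos M hd
  have hMd := Int.mul_ediv_add_emod M d
  exact ((Int.ediv_emod_unique (r := d - 1 - M % d) hd).2 ⟨by linarith, by omega, by omega⟩).1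

theorem pv_band_two_pow (a : Int) (k : Nat) :
    (PySem.Int.band a ((1:Int) <<< k) != 0) = decide ((a / (2^k : Int)) % 2 = 1) := by
  have hp : ((1:Int) <<< k) = ((2^k : Nat) : Int) := by
    rw [Int.shiftLeft_eq]; push_cast; ring
  have hcast : ((2:Int)^k) = ((2^k : Nat) : Int) := by push_cast; ring
  rw [hp, hcast]
  by_cases ha : 0 ≤ a
  · have he : a = ((a.toNat : Int)) := by omega
    rw [he]
    simp only [PySem.Int.band, if_pos (Int.natCast_nonneg a.toNat),
      if_pos (Int.natCast_nonneg ((2:Nat)^k)), Int.toNat_natCast, Nat.and_two_pow,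
      Nat.testBit_eq_decide_div_mod_eq, ← Int.natCast_div]
    have h2 : ((a.toNat / 2^k : Nat) : Int) % 2 = ((a.toNat / 2^k % 2 : Nat) : Int) := by
      push_cast; ring
    rw [h2]
    rcases (by omega : a.toNat / 2^k % 2 = 0 ∨ a.toNat / 2^k % 2 = 1) with h0 | h0 <;>
      simp [h0]
  · set M := -a - 1 with hMdef
    have hM0 : 0 ≤ M := by omega
    have haM : a = -(M+1) := by omega
    simp only [PySem.Int.band, if_neg ha, if_pos (Int.natCast_nonneg ((2:Nat)^k)),
      Int.toNat_natCast, Nat.two_pow_and, Nat.testBit_eq_decide_div_mod_eq]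
    have hq : (M.toNat : Int) = M := by omega
    have hdiv : a / ((2^k : Nat) : Int) = -(((M.toNat / 2^k : Nat)) : Int) - 1 := by
      rw [haM, ← hq, Int.natCast_div, pv_ediv_neg_succ _ _ (by positivity) (by positivity)]
      simp
    rw [hdiv]
    have hq2 : ((M.toNat / 2^k : Nat) : Int) % 2 = ((M.toNat / 2^k % 2 : Nat) : Int) := by
      push_cast; ring
    rcases (by omega : M.toNat / 2^k % 2 = 0 ∨ M.toNat / 2^k % 2 = 1) with h0 | h0
    all_goals rw [show (-a - 1).toNat = M.toNat from by rw [hMdef]]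
    · have : ((M.toNat / 2 ^ k : Nat) : Int) % 2 = 0 := by omega
      simp [h0, this]
      rw [max_eq_left hM0]
      rw [Int.natCast_div, hq, ← hcast] at this
      have h2 : (-(M / 2^k) - 1) % 2 = 1 := by omega
      simp [h2]
    · have : ((M.toNat / 2 ^ k : Nat) : Int) % 2 = 1 := by omega
      simp [h0]
      rw [max_eq_left hM0]
      rw [Int.natCast_div, hq, ← hcast] at this
      omega

theorem pv_mod_pos (x w : Int) (hw : 0 < w) : PySem.Int.mod x w = x % w := by
  simp [PySem.Int.mod, Int.fmod_eq_emod, le_of_lt hw]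

theorem pv_shift (a : Int) (s : Nat) : a >>> s = a / ((2:Int)^s) := by
  rw [Int.shiftRight_eq_div_pow]; push_cast; ring

theorem pv_field1 (a : Int) (s : Nat) :
    (PySem.Int.mod (a >>> s) 2 != 0) = (PySem.Int.band a ((1:Int) <<< s) != 0) := by
  rw [pv_band_two_pow, pv_mod_pos _ _ (by norm_num), pv_shift, Bool.eq_iff_iff]
  simp only [bne_iff_ne, ne_eq, decide_eq_true_eq]
  omega

theorem pv_field3 (a : Int) (s b c : Nat) (hb : b = s+1) (hc : c = s+2) :
    (PySem.Int.mod (a >>> s) 8 != 0)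
      = ((PySem.Int.band a ((1:Int) <<< s) != 0)
          || ((PySem.Int.band a ((1:Int) <<< b) != 0)
              || (PySem.Int.band a ((1:Int) <<< c) != 0))) := by
  subst hb hc
  rw [pv_band_two_pow, pv_band_two_pow, pv_band_two_pow,
    pv_mod_pos _ _ (by norm_num), pv_shift]
  have h1 : (2:Int)^(s+1) = 2^s * 2 := by ring
  have h2 : (2:Int)^(s+2) = 2^s * 4 := by ring
  rw [h1, h2, ← Int.ediv_ediv_of_nonneg (by positivity),
    ← Int.ediv_ediv_of_nonneg (by positivity), Bool.eq_iff_iff]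
  simp only [bne_iff_ne, ne_eq, Bool.or_eq_true, decide_eq_true_eq]
  omega

-- ===== VERDICT (by name: the statement is the Claim_ definition above) =====
theorem get_rows_for_chord_py_spec : Claim_equal_get_rows_for_chord_py := by
  intro mask _
  show get_rows_for_chord_py mask = get_rows_for_chord_py_alt mask
  have hI1 : PySem.Dict.items ROW_BITS
      = [("F1", [1, 2, 3]), ("F2", [5, 6, 7]), ("F3", [9, 10, 11]),
         ("F4", [13, 14, 15]), ("F0", [16, 17, 18])] := by decide
  have hI2 : PySem.Dict.items THUMB_BITS
      = [("T1", 0), ("T2", 4), ("T3", 8), ("T4", 12), ("T0", 19)] := by decide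
  have hI3 : PySem.Dict.items ROW_FIELDS
      = [("F1", (1, 8)), ("F2", (5, 8)), ("F3", (9, 8)), ("F4", (13, 8)), ("F0", (16, 8)),
         ("T1", (0, 2)), ("T2", (4, 2)), ("T3", (8, 2)), ("T4", (12, 2)), ("T0", (19, 2))] := by decide
  simp only [get_rows_for_chord_py, get_rows_for_chord_py_alt, hI1, hI2, hI3,
    List.foldl_cons, List.foldl_nil, List.any_cons, List.any_nil, Bool.or_false,
    Int.shiftRight_natCast_right, Int.shiftLeft_natCast_right]
  rw [pv_field3 mask 1 2 3 rfl rfl, pv_field3 mask 5 6 7 rfl rfl, pv_field3 mask 9 10 11 rfl rfl,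
    pv_field3 mask 13 14 15 rfl rfl, pv_field3 mask 16 17 18 rfl rfl,
    pv_field1 mask 0, pv_field1 mask 4, pv_field1 mask 8, pv_field1 mask 12, pv_field1 mask 19]
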